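-- pv_equiv track=rewrite | github.com/arungatla/coding | findminrotations.py | minrot
-- ===== SOURCE A (Python) =====
-- def minrot(arr):
--     if not arr: return -1
--     n = len(arr[0])
--     minarr=arr[0]
--     arr=arr[1:]
--     cnt=0
--     for s in arr:
--         if len(s) != n: return -1
--         if s==minarr:cnt+=0
--         else:
--             for i in range(1,len(s)+1):
--                 temp=s[i:]+s[:i]
--                 if temp==minarr:
--
--                     cnt+=i
--                     break
--     return cnt
-- ===== SOURCE B (Python) =====
-- def minrot(arr):
--     if not arr: return -1
--     first = arr[0]
--     n = len(first)
--     cnt = 0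
--     for s in arr[1:]:
--         if len(s) != n: return -1
--         if s == first: continue
--         f = (s + s).find(first)
--         if f > 0:
--             cnt += f
--     return cnt
-- ===== Notes on version B (the rewrite author's own statement) =====
-- stated objective: idiomatic
-- what changed: B replaces A's inner loop that builds every rotation s[i:]+s[:i] and compares it with the first string by the standard doubled-string trick: one substring search (s+s).find(first), whose index is exactly the smallest rotation count.
import Mathlib
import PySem

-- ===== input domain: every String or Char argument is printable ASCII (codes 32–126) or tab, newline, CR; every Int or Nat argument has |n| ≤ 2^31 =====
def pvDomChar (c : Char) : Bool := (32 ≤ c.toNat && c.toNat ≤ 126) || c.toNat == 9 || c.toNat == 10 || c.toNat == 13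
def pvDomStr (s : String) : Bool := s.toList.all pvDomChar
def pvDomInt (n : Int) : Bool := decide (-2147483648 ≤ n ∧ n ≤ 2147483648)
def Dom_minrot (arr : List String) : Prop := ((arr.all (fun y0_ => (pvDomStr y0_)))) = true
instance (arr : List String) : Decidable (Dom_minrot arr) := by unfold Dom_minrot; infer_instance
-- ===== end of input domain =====

-- B replaces A's per-string inner loop that builds every rotation s[i:]+s[:i] by one
-- substring search of the first string in the doubled string s+s (objective: idiomatic).

-- ===== PORT A =====
-- inner 'for i in range(1, len(s)+1): temp = s[i:]+s[:i]; if temp == minarr: cnt += i; break'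
-- (returns the added amount: first matching i, or 0 if the loop falls through)
def minrotRotScan (s minarr : List Char) : List Int → Int
  | [] => 0
  | i :: rest =>
      let temp := PySem.List.slice s (some i) none ++ PySem.List.slice s none (some i)
      if temp = minarr then i else minrotRotScan s minarr rest

-- outer 'for s in arr: …' with the early 'return -1' on a length mismatch
def minrotLoop (minarr : List Char) (n : Nat) (cnt : Int) : List (List Char) → Int
  | [] => cnt
  | s :: rest =>
      if s.length ≠ n then -1
      else if s = minarr then minrotLoop minarr n (cnt + 0) rest
      else minrotLoop minarr n
        (cnt + minrotRotScan s minarr (PySem.List.pyRange 1 ((s.length : Int) + 1) 1)) rest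

def minrot (arr : List String) : Int :=
  match arr with
  | [] => -1
  | a0 :: rest => minrotLoop a0.toList a0.toList.length 0 (rest.map String.toList)

-- ===== PORT B =====
def minrotAltLoop (first : List Char) (n : Nat) (cnt : Int) : List (List Char) → Int
  | [] => cnt
  | s :: rest =>
      if s.length ≠ n then -1
      else if s = first then minrotAltLoop first n cnt rest
      else
        let f := PySem.Chars.find (s ++ s) first
        minrotAltLoop first n (if f > 0 then cnt + f else cnt) rest

def minrot_alt (arr : List String) : Int :=
  match arr with
  | [] => -1
  | a0 :: rest => minrotAltLoop a0.toList a0.toList.length 0 (rest.map String.toList)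

-- ===== PRECONDITION & SPEC =====
def Spec_minrot (arr : List String) (out : Int) : Prop := out = minrot_alt arr
instance (arr : List String) (out : Int) : Decidable (Spec_minrot arr out) := by unfold Spec_minrot; infer_instance

-- ===== CLAIM (what is proved, stated in full; the proofs are below) =====
def Claim_equal_minrot : Prop := ∀ (arr : List String), Dom_minrot arr → Spec_minrot arr (minrot arr)

-- ===== LEMMAS AND PROOFS =====

-- rotation by i equals minarr  ↔  minarr occurs at position i of s ++ s  (i ≤ |s| = |m|)
lemma rot_iff_prefix_drop (s m : List Char) (i : Nat) (hlen : s.length = m.length)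
    (hi : i ≤ s.length) :
    (PySem.List.slice s (some (i : Int)) none ++ PySem.List.slice s none (some (i : Int)) = m)
      ↔ m <+: (s ++ s).drop i := by
  rw [PySem.List.slice_from_natCast, PySem.List.slice_to_natCast]
  rw [List.prefix_iff_eq_take]
  rw [List.drop_append_of_le_length hi]
  rw [List.take_append]
  have h1 : (s.drop i).length ≤ m.length := by rw [List.length_drop]; omega
  have h2 : m.length - (s.drop i).length = i := by rw [List.length_drop]; omega
  rw [List.take_of_length_le h1, h2]
  constructor
  · intro h; exact h.symm
  · intro h; exact h.symm

lemma rotScan_eq_zero (s m : List Char) (l : List Int)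
    (h : ∀ i ∈ l,
      PySem.List.slice s (some i) none ++ PySem.List.slice s none (some i) ≠ m) :
    minrotRotScan s m l = 0 := by
  induction l with
  | nil => rfl
  | cons i rest ih =>
      simp only [minrotRotScan]
      rw [if_neg (h i (by simp))]
      exact ih (fun j hj => h j (by simp [hj]))

-- ===== VERDICT helpers =====

lemma rotScan_finds (s m : List Char) (hlen : s.length = m.length)
    (f : Int) (hf : f = PySem.Chars.find (s ++ s) m) (hf0 : 0 ≤ f)
    (hfn : f.toNat ≤ s.length) (k : Nat) (hk1 : 1 ≤ k) (hkf : k ≤ f.toNat) :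
    minrotRotScan s m (PySem.List.pyRange (k : Int) ((s.length : Int) + 1) 1) = f := by
  have hspec := PySem.Chars.find_spec (hf ▸ hf0)
  rw [← hf] at hspec
  induction hd : f.toNat - k generalizing k with
  | zero =>
      have hkeq : k = f.toNat := by omega
      rw [PySem.List.pyRange_one_cons (by omega)]
      simp only [minrotRotScan]
      rw [if_pos]
      · omega
      · rw [rot_iff_prefix_drop s m k hlen (by omega), hkeq]
        exact hspec.1
  | succ d ih =>
      rw [PySem.List.pyRange_one_cons (by omega)]
      simp only [minrotRotScan]
      rw [if_neg]
      · have := ih (k + 1) (by omega) (by omega) (by omega)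
        simpa using this
      · rw [rot_iff_prefix_drop s m k hlen (by omega)]
        exact hspec.2 k (by omega)

-- the contribution of one non-equal string: A's inner scan = B's doubled-string find
lemma contrib_eq (s m : List Char) (hlen : s.length = m.length) (hne : s ≠ m) :
    minrotRotScan s m (PySem.List.pyRange 1 ((s.length : Int) + 1) 1)
      = (if PySem.Chars.find (s ++ s) m > 0 then PySem.Chars.find (s ++ s) m else 0) := by
  set f := PySem.Chars.find (s ++ s) m with hf
  rcases Int.lt_or_le f 0 with hneg | hpos
  · -- no occurrence: f = -1, both sides 0
    have hfeq : f = -1 := by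
      have := PySem.Chars.neg_one_le_find (s ++ s) m
      omega
    rw [if_neg (by omega)]
    apply rotScan_eq_zero
    intro i hi
    rw [PySem.List.mem_pyRange_one] at hi
    have hi' : i = ((i.toNat : Nat) : Int) := by omega
    rw [hi']
    rw [Ne, rot_iff_prefix_drop s m i.toNat hlen (by omega)]
    intro hpref
    have : PySem.Chars.isIn m (s ++ s) = true :=
      (PySem.Chars.exists_prefix_drop_iff_isIn m (s ++ s)).1 ⟨i.toNat, hpref⟩
    have hinf := (PySem.Chars.isIn_iff_infix m (s ++ s)).1 this
    have := (PySem.Chars.find_ne_neg_one_iff (s ++ s) m).2 hinf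
    exact this (hf ▸ hfeq)
  · -- occurrence at f; f ≠ 0 since s ≠ m, and f ≤ |s|
    have hspec := PySem.Chars.find_spec (hf ▸ hpos)
    rw [← hf] at hspec
    have hne0 : f.toNat ≠ 0 := by
      intro h0
      have hpref := hspec.1
      rw [h0, List.drop_zero, List.prefix_iff_eq_take, ← hlen, List.take_left] at hpref
      exact hne hpref.symm
    have hfn : f.toNat ≤ s.length := by
      have hlenle := hspec.1.length_le
      have hle2n : f ≤ ((s ++ s).length : Int) := hf ▸ PySem.Chars.find_le_length (s ++ s) m
      simp only [List.length_drop, List.length_append] at hlenle hle2n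
      omega
    rw [if_pos (by omega)]
    exact rotScan_finds s m hlen f hf hpos hfn 1 le_rfl (by omega)

lemma loop_eq (m : List Char) (l : List (List Char)) :
    ∀ cnt : Int, minrotLoop m m.length cnt l = minrotAltLoop m m.length cnt l := by
  induction l with
  | nil => intro cnt; rfl
  | cons s rest ih =>
      intro cnt
      simp only [minrotLoop, minrotAltLoop]
      split_ifs with h1 h2 h3
      · rfl
      · simpa using ih (cnt + 0)
      · rw [contrib_eq s m (by omega) h2, if_pos h3, ih]
      · rw [contrib_eq s m (by omega) h2, if_neg h3, add_zero, ih]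

-- ===== VERDICT (by name: the statement is the Claim_ definition above) =====
theorem minrot_spec : Claim_equal_minrot := by
  intro arr _
  unfold Spec_minrot
  match arr with
  | [] => rfl
  | a0 :: rest =>
      simp only [minrot, minrot_alt]
      exact loop_eq a0.toList (rest.map String.toList) 0
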